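-- pv_equiv track=rewrite | github.com/pypi-data/pypi-mirror-390 | packages/norpm/norpm-1.7.tar.gz/norpm-1.7/norpm/specfile.py | _is_condition
-- ===== SOURCE A (Python) =====
-- def _is_condition(buffer):
--     """Return True if the macro name condition"""
--     special = {"if", "else", "ifarch", "endif"}
--     for s in special:
--         if not buffer.startswith("%" + s):
--             continue
--         if len(buffer) == len(s) + 1:
--             return True
--         first_after = buffer[len(s)+1]
--         if first_after == "%":
--             return True
--         if first_after.isspace():
--             return True
--     return False
-- ===== SOURCE B (Python) =====
-- def _is_condition(buffer):
--     """Return True if the macro name condition"""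
--     if not buffer.startswith("%"):
--         return False
--     i = 1
--     while i < len(buffer) and buffer[i].isalpha():
--         i += 1
--     if buffer[1:i] not in ("if", "else", "ifarch", "endif"):
--         return False
--     return i == len(buffer) or buffer[i] == "%" or buffer[i].isspace()
-- ===== Notes on version B (the rewrite author's own statement) =====
-- stated objective: simpler
-- what changed: A loops over the four conditional keywords, testing percent-plus-keyword as a prefix and probing the boundary character per keyword; B parses once: after the leading percent sign it scans the maximal run of alphabetic characters to extract the macro name, looks that name up in the keyword set, and accepts iff the character after the name is end-of-string, a percent sign or whitespace.
import Mathlib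
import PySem

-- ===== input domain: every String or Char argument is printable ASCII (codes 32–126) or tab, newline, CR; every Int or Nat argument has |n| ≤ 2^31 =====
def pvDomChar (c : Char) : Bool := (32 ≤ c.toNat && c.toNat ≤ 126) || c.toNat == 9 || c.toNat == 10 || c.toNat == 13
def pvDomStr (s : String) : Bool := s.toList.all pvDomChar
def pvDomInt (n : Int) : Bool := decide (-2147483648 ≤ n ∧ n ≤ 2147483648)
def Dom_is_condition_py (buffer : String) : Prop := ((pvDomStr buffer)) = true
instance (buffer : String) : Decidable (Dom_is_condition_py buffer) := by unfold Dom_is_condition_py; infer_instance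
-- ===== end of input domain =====

-- B replaces A's loop over the keyword set (prefix test + boundary check per keyword) by a single
-- character scan that extracts the macro name once and looks it up; objective: simpler, not faster.

-- ===== PORT A =====
-- the Python set literal {"if", "else", "ifarch", "endif"} (insertion order; the loop only ORs keyword checks, so iteration order is immaterial)
def pvSpecialA : List (List Char) :=
  PySem.Set.ofList [['i','f'], ['e','l','s','e'], ['i','f','a','r','c','h'], ['e','n','d','i','f']]

-- the 'for s in special' loop of A, one keyword per step
def pvLoopA (cs : List Char) : List (List Char) → Bool
  | [] => false
  | s :: rest =>
    if ¬ PySem.Chars.startswith cs ('%' :: s) then pvLoopA cs rest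
    else if cs.length = s.length + 1 then true
    else
      match PySem.List.pyGet? cs ((s.length : Int) + 1) with
      | none => false   -- unreachable: startswith makes the index in range (Python never raises here)
      | some c =>
        if c = '%' then true
        else if PySem.Chars.isspace c then true
        else pvLoopA cs rest

def is_condition_py (buffer : String) : Bool := pvLoopA buffer.toList pvSpecialA

-- ===== PORT B =====
-- B's while-loop scan: split off the maximal run of alphabetic characters
def pvScanB : List Char → List Char × List Char
  | [] => ([], [])
  | c :: cs =>
    if PySem.Chars.isalpha c then
      let p := pvScanB cs
      (c :: p.1, p.2)
    else ([], c :: cs)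

-- B's final line: end of string, '%', or whitespace just past the name
def pvBnd : List Char → Bool
  | [] => true
  | c :: _ => c = '%' || PySem.Chars.isspace c

def is_condition_py_alt (buffer : String) : Bool :=
  match buffer.toList with
  | [] => false
  | c :: t =>
    if c = '%' then
      let p := pvScanB t
      if p.1 ∈ ([['i','f'], ['e','l','s','e'], ['i','f','a','r','c','h'], ['e','n','d','i','f']] : List (List Char)) then
        pvBnd p.2
      else false
    else false

-- ===== PRECONDITION & SPEC =====
def Spec_is_condition_py (buffer : String) (out : Bool) : Prop := out = is_condition_py_alt buffer
instance (buffer : String) (out : Bool) : Decidable (Spec_is_condition_py buffer out) := by unfold Spec_is_condition_py; infer_instance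

-- ===== CLAIM (what is proved, stated in full; the proofs are below) =====
def Claim_equal_is_condition_py : Prop := ∀ (buffer : String), Dom_is_condition_py buffer → Spec_is_condition_py buffer (is_condition_py buffer)

-- ===== LEMMAS AND PROOFS =====

lemma pvScanB_eq (t : List Char) :
    pvScanB t = (t.takeWhile PySem.Chars.isalpha, t.dropWhile PySem.Chars.isalpha) := by
  induction t with
  | nil => rfl
  | cons c cs ih =>
    by_cases h : PySem.Chars.isalpha c = true <;> simp [pvScanB, h, ih]

lemma pv_alpha_ne_pct (c : Char) (h : PySem.Chars.isalpha c = true) : c ≠ '%' := by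
  rintro rfl; simp [PySem.Chars.isalpha, PySem.Chars.isupper, PySem.Chars.islower] at h

lemma pv_alpha_not_space (c : Char) (h : PySem.Chars.isalpha c = true) :
    PySem.Chars.isspace c = false := by
  simp only [PySem.Chars.isalpha, PySem.Chars.isupper, PySem.Chars.islower, Bool.or_eq_true,
    Bool.and_eq_true, decide_eq_true_eq] at h
  simp only [PySem.Chars.isspace, Bool.or_eq_false_iff, Bool.and_eq_false_iff,
    decide_eq_false_iff_not]
  have h' : 65 ≤ c.toNat ∧ c.toNat ≤ 90 ∨ 97 ≤ c.toNat ∧ c.toNat ≤ 122 := by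
    rcases h with ⟨h1, h2⟩ | ⟨h1, h2⟩
    · left; exact ⟨h1, h2⟩
    · right; exact ⟨h1, h2⟩
  omega

lemma pv_tw_append (s u : List Char) (hs : ∀ c ∈ s, PySem.Chars.isalpha c = true) :
    (s ++ u).takeWhile PySem.Chars.isalpha = s ++ u.takeWhile PySem.Chars.isalpha := by
  induction s with
  | nil => simp
  | cons c s ih =>
    simp only [List.cons_append, List.takeWhile_cons, hs c (by simp)]
    simp [ih fun d hd => hs d (by simp [hd])]

lemma pv_dw_append (s u : List Char) (hs : ∀ c ∈ s, PySem.Chars.isalpha c = true) :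
    (s ++ u).dropWhile PySem.Chars.isalpha = u.dropWhile PySem.Chars.isalpha := by
  induction s with
  | nil => simp
  | cons c s ih =>
    simp only [List.cons_append, List.dropWhile_cons, hs c (by simp)]
    simp [ih fun d hd => hs d (by simp [hd])]

-- one step of A's loop, rephrased as B's 'name equals this keyword and the boundary is good'
lemma pvLoopA_step (t s : List Char) (rest : List (List Char))
    (hs : ∀ c ∈ s, PySem.Chars.isalpha c = true) :
    pvLoopA ('%' :: t) (s :: rest) =
      ((decide (t.takeWhile PySem.Chars.isalpha = s)
          && pvBnd (t.dropWhile PySem.Chars.isalpha)) || pvLoopA ('%' :: t) rest) := by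
  by_cases hpre : s <+: t
  · obtain ⟨u, rfl⟩ := hpre
    have hsw : PySem.Chars.startswith ('%' :: (s ++ u)) ('%' :: s) = true := by
      rw [PySem.Chars.startswith_iff]
      exact List.cons_prefix_cons.mpr ⟨rfl, ⟨u, rfl⟩⟩
    have htw := pv_tw_append s u hs
    have hdw := pv_dw_append s u hs
    cases u with
    | nil =>
      simp only [List.append_nil] at hsw htw hdw
      have h1 : s.takeWhile PySem.Chars.isalpha = s := by simpa using htw
      have h2 : s.dropWhile PySem.Chars.isalpha = [] := by simpa using hdw
      simp [pvLoopA, hsw, h1, h2, pvBnd]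
    | cons c u' =>
      have hlen : ('%' :: (s ++ c :: u')).length ≠ s.length + 1 := by simp only [List.length_cons, List.length_append]; omega
      have hget : PySem.List.pyGet? ('%' :: (s ++ c :: u')) ((s.length : Int) + 1)
          = some c := by
        have h0 : ('%' :: (s ++ c :: u')) = ('%' :: s) ++ c :: u' := by simp
        have h1 := PySem.List.pyGet?_append_length (pre := '%' :: s) (y := c) (ys := u')
        simp only [List.length_cons] at h1
        rw [h0, show ((s.length : Int) + 1) = ((s.length + 1 : Nat) : Int) by push_cast; ring]
        exact h1
      by_cases hc : PySem.Chars.isalpha c = true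
      · -- boundary char is alphabetic: neither side fires this keyword
        have h1 : (s ++ c :: u').takeWhile PySem.Chars.isalpha ≠ s := by
          rw [htw]
          intro hcontr
          have := congrArg List.length hcontr
          simp [hc] at this
        simp [pvLoopA, hsw, hget, pv_alpha_ne_pct c hc, pv_alpha_not_space c hc, h1]
      · have h1 : (s ++ c :: u').takeWhile PySem.Chars.isalpha = s := by
          simp [htw, hc]
        have h2 : (s ++ c :: u').dropWhile PySem.Chars.isalpha = c :: u' := by
          simp [hdw, hc]
        by_cases hpc : c = '%'
        · subst hpc
          simp [pvLoopA, hsw, hget, h1, h2, pvBnd]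
        · by_cases hsp : PySem.Chars.isspace c = true
          · simp [pvLoopA, hsw, hget, hpc, hsp, h1, h2, pvBnd]
          · simp [pvLoopA, hsw, hget, hpc, hsp, h1, h2, pvBnd]
  · have hsw : PySem.Chars.startswith ('%' :: t) ('%' :: s) = false := by
      rw [Bool.eq_false_iff]
      intro hcontr
      rw [PySem.Chars.startswith_iff, List.cons_prefix_cons] at hcontr
      exact hpre hcontr.2
    have h1 : t.takeWhile PySem.Chars.isalpha ≠ s := by
      intro hcontr
      exact hpre (hcontr ▸ List.takeWhile_prefix _)
    simp [pvLoopA, hsw, h1]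

-- A's whole loop on a '%'-initial buffer equals B's lookup-and-boundary check
lemma pvLoopA_pct (t : List Char) :
    pvLoopA ('%' :: t) pvSpecialA =
      (decide (t.takeWhile PySem.Chars.isalpha
          ∈ ([['i','f'], ['e','l','s','e'], ['i','f','a','r','c','h'], ['e','n','d','i','f']] : List (List Char)))
        && pvBnd (t.dropWhile PySem.Chars.isalpha)) := by
  have halpha : ∀ s ∈ ([['i','f'], ['e','l','s','e'], ['i','f','a','r','c','h'], ['e','n','d','i','f']] : List (List Char)),
      ∀ c ∈ s, PySem.Chars.isalpha c = true := by
    simp [PySem.Chars.isalpha, PySem.Chars.isupper, PySem.Chars.islower]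
  have hsp : pvSpecialA
      = [['i','f'], ['e','l','s','e'], ['i','f','a','r','c','h'], ['e','n','d','i','f']] := by decide
  rw [hsp]
  rw [pvLoopA_step t _ _ (halpha _ (by simp)), pvLoopA_step t _ _ (halpha _ (by simp)),
    pvLoopA_step t _ _ (halpha _ (by simp)), pvLoopA_step t _ _ (halpha _ (by simp))]
  cases hb : pvBnd (t.dropWhile PySem.Chars.isalpha) <;>
    simp [pvLoopA, List.mem_cons]

lemma pvLoopA_nonpct (c : Char) (t : List Char) (hc : c ≠ '%') (K : List (List Char)) :
    pvLoopA (c :: t) K = false := by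
  induction K with
  | nil => rfl
  | cons s rest ih =>
    have hsw : PySem.Chars.startswith (c :: t) ('%' :: s) = false := by
      rw [Bool.eq_false_iff]
      intro hcontr
      rw [PySem.Chars.startswith_iff, List.cons_prefix_cons] at hcontr
      exact hc hcontr.1.symm
    simp [pvLoopA, hsw, ih]

-- ===== VERDICT (by name: the statement is the Claim_ definition above) =====
theorem is_condition_py_spec : Claim_equal_is_condition_py := by
  intro buffer _
  unfold Spec_is_condition_py is_condition_py is_condition_py_alt
  cases hcs : buffer.toList with
  | nil => rfl
  | cons c t =>
    by_cases hc : c = '%'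
    · subst hc
      rw [pvLoopA_pct t]
      simp [pvScanB_eq]
    · rw [pvLoopA_nonpct c t hc]
      simp [hc]
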